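-- pv_equiv track=rewrite | github.com/JWCISLO85/python-email-parser | Phishing_Email_Detector.py | check_suspicious_words
-- ===== SOURCE A (Python) =====
-- def check_suspicious_words(email_body, suspicious_words_list):
--    word_count=0 #The variable that stores the number of words
--    words_found=[] #Words that are found are put into a list
--    for word in suspicious_words_list:  # For loop that checks the suspicious words list
--         if word in email_body.lower():  # Checks email for words and changes them to lower case even if they are capitalized so it matches
--          words_found.append(word)  # This adds the words to the list (.append)
--          word_count = word_count + 1 #When words are found it adds 1 and stores the value
--
--    return word_count, words_found #Returns the results
-- ===== SOURCE B (Python) =====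
-- def check_suspicious_words(email_body, suspicious_words_list):
--     body = email_body.lower()
--     lengths = {len(w) for w in suspicious_words_list}
--     subs = set()
--     for n in lengths:
--         if n <= len(body):
--             for i in range(len(body) - n + 1):
--                 subs.add(body[i:i + n])
--     words_found = [w for w in suspicious_words_list if w in subs]
--     return len(words_found), words_found
-- ===== Notes on version B (the rewrite author's own statement) =====
-- stated objective: faster
-- what changed: Instead of scanning the whole body once per suspicious word, B lowers the body once, builds a set of all window substrings of the lowered body (one sliding pass per distinct pattern length), and then answers each word by a set lookup.
import Mathlib
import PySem

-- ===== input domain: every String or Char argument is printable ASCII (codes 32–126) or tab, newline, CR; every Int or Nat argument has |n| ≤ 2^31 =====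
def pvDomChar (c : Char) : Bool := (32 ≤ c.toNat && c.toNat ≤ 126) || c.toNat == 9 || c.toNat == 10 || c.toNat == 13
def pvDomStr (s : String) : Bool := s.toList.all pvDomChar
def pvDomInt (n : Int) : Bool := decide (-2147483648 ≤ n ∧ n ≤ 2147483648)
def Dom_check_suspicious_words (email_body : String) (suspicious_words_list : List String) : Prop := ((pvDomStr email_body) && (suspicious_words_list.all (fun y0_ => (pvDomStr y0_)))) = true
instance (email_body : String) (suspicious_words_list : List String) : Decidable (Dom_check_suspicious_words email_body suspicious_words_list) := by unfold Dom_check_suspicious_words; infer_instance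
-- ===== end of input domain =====

-- B replaces A's per-word scan of the body by a substring index (all window
-- substrings of the lowered body, one pass per distinct pattern length) built
-- once and looked up per word.

-- ===== PORT A =====
-- A: loop over the word list, test `word in email_body.lower()`, appending and counting.
def check_suspicious_words (email_body : String) (suspicious_words_list : List String) : Int × List String :=
  suspicious_words_list.foldl
    (fun (st : Int × List String) word =>
      if PySem.Str.isIn word (PySem.Str.lower email_body) then (st.1 + 1, st.2 ++ [word])
      else st)
    (0, [])

-- ===== PORT B =====
-- B: lower the body once; for each distinct pattern length n (Python len(w) ≥ 0 is
-- ported as List.length : Nat), collect every window body[i:i+n] into a set; then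
-- one membership test per word.  range(len(body)-n+1) is List.range under the
-- guard n ≤ len(body), where Nat subtraction agrees with Python's.
def check_suspicious_words_alt (email_body : String) (suspicious_words_list : List String) : Int × List String :=
  let body := PySem.Str.lower email_body
  let lengths : PySem.Set Nat := PySem.Set.ofList (suspicious_words_list.map (fun w => w.toList.length))
  let subs : PySem.Set String :=
    lengths.foldl
      (fun s n =>
        if n ≤ body.toList.length then
          (List.range (body.toList.length - n + 1)).foldl
            (fun s (i : Nat) => PySem.Set.add s (PySem.Str.slice body (some (i : Int)) (some ((i : Int) + (n : Int))))) s
        else s)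
      PySem.Set.empty
  let words_found := suspicious_words_list.filter (fun w => PySem.Set.contains subs w)
  ((words_found.length : Int), words_found)

-- ===== PRECONDITION & SPEC =====
def Spec_check_suspicious_words (email_body : String) (suspicious_words_list : List String) (out : Int × List String) : Prop := out = check_suspicious_words_alt email_body suspicious_words_list
instance (email_body : String) (suspicious_words_list : List String) (out : Int × List String) : Decidable (Spec_check_suspicious_words email_body suspicious_words_list out) := by unfold Spec_check_suspicious_words; infer_instance

-- ===== CLAIM (what is proved, stated in full; the proofs are below) =====
def Claim_equal_check_suspicious_words : Prop := ∀ (email_body : String) (suspicious_words_list : List String), Dom_check_suspicious_words email_body suspicious_words_list → Spec_check_suspicious_words email_body suspicious_words_list (check_suspicious_words email_body suspicious_words_list)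

-- ===== LEMMAS AND PROOFS =====

-- A's fold accumulates exactly the filtered list and its length.
theorem foldA_eq (p : String → Bool) (ws : List String) (c : Int) (acc : List String) :
    ws.foldl (fun (st : Int × List String) w => if p w then (st.1 + 1, st.2 ++ [w]) else st) (c, acc)
      = (c + ((ws.filter p).length : Int), acc ++ ws.filter p) := by
  induction ws generalizing c acc with
  | nil => simp
  | cons w ws ih =>
    by_cases h : p w = true
    · simp only [List.foldl_cons, h, if_true, ih, List.filter_cons_of_pos h, List.length_cons,
        Prod.mk.injEq]
      refine ⟨by push_cast; ring, by simp⟩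
    · simp [List.foldl_cons, h, ih]

-- membership in a fold of Set.add
theorem mem_foldl_add {α β : Type} [BEq α] [LawfulBEq α] (f : β → α) (l : List β) (s : PySem.Set α) (x : α) :
    x ∈ l.foldl (fun s b => PySem.Set.add s (f b)) s ↔ x ∈ s ∨ ∃ b ∈ l, x = f b := by
  induction l generalizing s with
  | nil => simp
  | cons b l ih => simp [List.foldl_cons, ih, PySem.Set.mem_add]; tauto

theorem slice_window (body : String) (i n : Nat) :
    (PySem.Str.slice body (some (i : Int)) (some ((i : Int) + (n : Int)))).toList
      = (body.toList.drop i).take n := by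
  rw [show ((i : Int) + (n : Int)) = ((i + n : Nat) : Int) by push_cast; ring]
  simp only [PySem.Str.toList_slice, PySem.Chars.slice_eq_listSlice, PySem.List.slice_natCast]
  simp

-- membership in B's substring index
theorem mem_subs (body : String) (ns : List Nat) (s : PySem.Set String) (x : String) :
    (x ∈ ns.foldl
        (fun s n =>
          if n ≤ body.toList.length then
            (List.range (body.toList.length - n + 1)).foldl
              (fun s (i : Nat) => PySem.Set.add s (PySem.Str.slice body (some (i : Int)) (some ((i : Int) + (n : Int))))) s
          else s)
        s)
      ↔ x ∈ s ∨ ∃ n ∈ ns, n ≤ body.toList.length ∧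
          ∃ i < body.toList.length - n + 1, x.toList = (body.toList.drop i).take n := by
  induction ns generalizing s with
  | nil => simp
  | cons n ns ih =>
    rw [List.foldl_cons, ih]
    have hwin : ∀ i : Nat,
        x = PySem.Str.slice body (some (i : Int)) (some ((i : Int) + (n : Int)))
          ↔ x.toList = (body.toList.drop i).take n := by
      intro i
      rw [← slice_window body i n, String.toList_inj]
    by_cases hn : n ≤ body.toList.length
    · rw [if_pos hn, mem_foldl_add]
      constructor
      · rintro (⟨hx | ⟨i, hi, hx⟩⟩ | ⟨m, hm, hrest⟩)
        · exact Or.inl hx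
        · exact Or.inr ⟨n, List.mem_cons_self, hn, i, List.mem_range.1 hi, (hwin i).1 hx⟩
        · exact Or.inr ⟨m, List.mem_cons_of_mem _ hm, hrest⟩
      · rintro (hx | ⟨m, hm, hle, i, hi, hx⟩)
        · exact Or.inl (Or.inl hx)
        · rcases List.mem_cons.1 hm with rfl | hm
          · exact Or.inl (Or.inr ⟨i, List.mem_range.2 hi, (hwin i).2 hx⟩)
          · exact Or.inr ⟨m, hm, hle, i, hi, hx⟩
    · rw [if_neg hn]
      constructor
      · rintro (hx | ⟨m, hm, hrest⟩)
        · exact Or.inl hx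
        · exact Or.inr ⟨m, List.mem_cons_of_mem _ hm, hrest⟩
      · rintro (hx | ⟨m, hm, hle, hrest⟩)
        · exact Or.inl hx
        · rcases List.mem_cons.1 hm with rfl | hm
          · exact absurd hle hn
          · exact Or.inr ⟨m, hm, hle, hrest⟩

-- a substring occurrence yields a window of the word's own length, and conversely
theorem isIn_window (L w : List Char) (h : PySem.Chars.isIn w L = true) :
    w.length ≤ L.length ∧ ∃ i < L.length - w.length + 1, w = (L.drop i).take w.length := by
  obtain ⟨j, hj⟩ := (PySem.Chars.exists_prefix_drop_iff_isIn w L).2 h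
  have hlen : w.length ≤ L.length - j := by simpa using hj.length_le
  refine ⟨by omega, ?_⟩
  by_cases h0 : w.length = 0
  · exact ⟨0, by omega, by simp [List.length_eq_zero_iff.1 h0]⟩
  · exact ⟨j, by omega, List.prefix_iff_eq_take.mp hj⟩

theorem window_isIn (L w : List Char) (i n : Nat) (hx : w = (L.drop i).take n) :
    PySem.Chars.isIn w L = true := by
  rw [PySem.Chars.isIn_iff_infix, hx]
  exact ((List.take_prefix n (List.drop i L)).isInfix).trans (List.drop_suffix i L).isInfix

-- ===== VERDICT (by name: the statement is the Claim_ definition above) =====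
theorem check_suspicious_words_spec : Claim_equal_check_suspicious_words := by
  intro eb ws _
  show _ = check_suspicious_words_alt eb ws
  unfold check_suspicious_words check_suspicious_words_alt
  simp only []
  rw [foldA_eq]
  have hfilter : ws.filter (fun w => PySem.Str.isIn w (PySem.Str.lower eb))
      = ws.filter (fun w => PySem.Set.contains
          ((PySem.Set.ofList (ws.map (fun w => w.toList.length))).foldl
            (fun s n =>
              if n ≤ (PySem.Str.lower eb).toList.length then
                (List.range ((PySem.Str.lower eb).toList.length - n + 1)).foldl
                  (fun s (i : Nat) => PySem.Set.add s (PySem.Str.slice (PySem.Str.lower eb) (some (i : Int)) (some ((i : Int) + (n : Int))))) s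
              else s)
            PySem.Set.empty) w) := by
    apply List.filter_congr
    intro w hw
    rw [Bool.eq_iff_iff, PySem.Set.contains_iff, mem_subs, PySem.Str.isIn_eq]
    have hmem : w.toList.length ∈ PySem.Set.ofList (ws.map (fun w => w.toList.length)) := by
      rw [PySem.Set.mem_ofList]
      exact List.mem_map_of_mem hw
    constructor
    · intro hin
      obtain ⟨hle, i, hi, hx⟩ := isIn_window (PySem.Str.lower eb).toList w.toList hin
      exact Or.inr ⟨w.toList.length, hmem, hle, i, hi, hx⟩
    · rintro (hx | ⟨n, hn, hle, i, hi, hx⟩)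
      · simp [PySem.Set.empty] at hx
      · exact window_isIn (PySem.Str.lower eb).toList w.toList i n hx
  rw [hfilter]
  simp
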